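-- pv_equiv track=rewrite | github.com/glnskkh/shen_py | 1.2/test_36.py | line_sums
-- ===== SOURCE A (Python) =====
-- def line_sums(a: list[list[int]], m: int) -> list[list[int]]:
--     lines: list[list[int]] = []
--
--     for i in range(len(a)):
--         s = sum(a[i][:m])
--
--         lines.append([])
--
--         for j in range(len(a[i]) - m + 1):
--             lines[i].append(s)
--
--             if j != len(a[i]) - m:
--                 s += a[i][j + m] - a[i][j]
--
--     return lines
-- ===== SOURCE B (Python) =====
-- def line_sums(a: list[list[int]], m: int) -> list[list[int]]:
--     return [[sum(row[j:j + m]) for j in range(len(row) - m + 1)] for row in a]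
-- ===== Notes on version B (the rewrite author's own statement) =====
-- stated objective: simpler
-- what changed: Replaces the stateful outer-index loop with a running incremental sum (add next element, subtract leaving element) by a nested comprehension that independently slices and sums each m-wide window.
import Mathlib
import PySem

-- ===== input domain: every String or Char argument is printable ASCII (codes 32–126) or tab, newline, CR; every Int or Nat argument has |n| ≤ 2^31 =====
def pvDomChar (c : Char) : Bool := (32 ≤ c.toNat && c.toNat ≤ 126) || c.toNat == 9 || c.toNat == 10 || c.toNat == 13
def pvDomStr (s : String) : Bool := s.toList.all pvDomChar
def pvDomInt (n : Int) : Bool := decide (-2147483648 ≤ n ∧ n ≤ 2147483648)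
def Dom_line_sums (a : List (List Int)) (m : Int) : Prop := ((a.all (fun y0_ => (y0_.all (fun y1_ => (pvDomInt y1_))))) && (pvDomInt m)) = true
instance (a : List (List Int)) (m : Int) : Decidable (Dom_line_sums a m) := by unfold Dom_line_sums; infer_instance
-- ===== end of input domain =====

-- B replaces A's running incremental window sum with an independent slice-and-sum per window (simpler).


-- ===== PORT A =====
-- A's inner loop: running sum s, append then telescope s by a[i][j+m] - a[i][j]
def line_sums_inner (row : List Int) (m : Int) : List Int :=
  ((PySem.List.pyRange 0 (PySem.List.len row - m + 1) 1).foldl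
    (fun (st : List Int × Int) j =>
      (st.1 ++ [st.2],
       if j ≠ PySem.List.len row - m then
         st.2 + PySem.List.pyGetD row (j + m) 0 - PySem.List.pyGetD row j 0
       else st.2))
    ([], (PySem.List.slice row none (some m)).sum)).1

def line_sums (a : List (List Int)) (m : Int) : List (List Int) :=
  (PySem.List.pyRange 0 (PySem.List.len a) 1).foldl
    (fun lines i => lines ++ [line_sums_inner (PySem.List.pyGetD a i []) m]) []

-- ===== PORT B =====
def line_sums_alt (a : List (List Int)) (m : Int) : List (List Int) :=
  a.map (fun row =>
    (PySem.List.pyRange 0 (PySem.List.len row - m + 1) 1).map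
      (fun j => (PySem.List.slice row (some j) (some (j + m))).sum))

-- ===== PRECONDITION & SPEC =====
-- Pre_ excludes m < 0 with nonempty a: there A's index update reads out of range and raises IndexError.
def Pre_line_sums (a : List (List Int)) (m : Int) : Prop := 0 ≤ m ∨ a = []
instance (a : List (List Int)) (m : Int) : Decidable (Pre_line_sums a m) := by unfold Pre_line_sums; infer_instance

def pvWitness_line_sums : List (List Int) × Int := ([[1, 2, 3, 4], [5]], 2)

def Spec_line_sums (a : List (List Int)) (m : Int) (out : List (List Int)) : Prop := out = line_sums_alt a m
instance (a : List (List Int)) (m : Int) (out : List (List Int)) : Decidable (Spec_line_sums a m out) := by unfold Spec_line_sums; infer_instance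

-- ===== CLAIM (what is proved, stated in full; the proofs are below) =====
def Claim_equal_line_sums : Prop := ∀ (a : List (List Int)) (m : Int), Dom_line_sums a m → Pre_line_sums a m → Spec_line_sums a m (line_sums a m)

-- ===== LEMMAS AND PROOFS =====

-- window sum telescoping: sliding the window one step adds the entering element and removes the leaving one
theorem window_succ (row : List Int) (m j : Int) (hm : 0 ≤ m) (hj : 0 ≤ j)
    (h : j + m < PySem.List.len row) :
    (PySem.List.slice row (some (j + 1)) (some (j + 1 + m))).sum
      = (PySem.List.slice row (some j) (some (j + m))).sum
        + PySem.List.pyGetD row (j + m) 0 - PySem.List.pyGetD row j 0 := by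
  simp only [PySem.List.len_eq] at h
  rw [PySem.List.slice_toNat row (by omega) (by omega),
      PySem.List.slice_toNat row hj (by omega),
      PySem.List.pyGetD_eq_getElem row 0 (by omega) h,
      PySem.List.pyGetD_eq_getElem row 0 hj (by omega)]
  rw [show (j + 1).toNat = j.toNat + 1 from by omega]
  rw [show (j + 1 + m).toNat - (j.toNat + 1) = m.toNat from by omega,
      show (j + m).toNat - j.toNat = m.toNat from by omega]
  simp only [show (j + m).toNat = j.toNat + m.toNat from by omega]
  rcases Nat.eq_zero_or_pos m.toNat with hk | hk
  · simp [hk]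
  · obtain ⟨k, hmk⟩ : ∃ k, m.toNat = k + 1 := ⟨m.toNat - 1, by omega⟩
    simp only [hmk]
    have hjlt : j.toNat < row.length := by omega
    have hR : (row.drop j.toNat).take (k + 1)
        = row[j.toNat] :: (row.drop (j.toNat + 1)).take k := by
      rw [List.drop_eq_getElem_cons hjlt, List.take_succ_cons]
    have hL : (row.drop (j.toNat + 1)).take (k + 1)
        = (row.drop (j.toNat + 1)).take k ++ [row[j.toNat + (k + 1)]'(by omega)] := by
      rw [List.take_add_one, List.getElem?_drop,
          show j.toNat + 1 + k = j.toNat + (k + 1) from by omega,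
          List.getElem?_eq_getElem (by omega)]
      simp
    rw [hR, hL]
    simp [List.sum_append]
    ring

-- the inner loop invariant: starting from window sum at lo, the loop emits all window sums from lo on
theorem loop_aux (row : List Int) (m : Int) (hm : 0 ≤ m) :
    ∀ (n : Nat) (lo : Int) (acc : List Int), 0 ≤ lo →
      (PySem.List.len row - m + 1 - lo).toNat = n →
      ((PySem.List.pyRange lo (PySem.List.len row - m + 1) 1).foldl
        (fun (st : List Int × Int) j =>
          (st.1 ++ [st.2],
           if j ≠ PySem.List.len row - m then
             st.2 + PySem.List.pyGetD row (j + m) 0 - PySem.List.pyGetD row j 0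
           else st.2))
        (acc, (PySem.List.slice row (some lo) (some (lo + m))).sum)).1
      = acc ++ (PySem.List.pyRange lo (PySem.List.len row - m + 1) 1).map
          (fun j => (PySem.List.slice row (some j) (some (j + m))).sum) := by
  intro n
  induction n with
  | zero =>
    intro lo acc hlo hn
    rw [PySem.List.pyRange_one_eq_nil (by omega)]
    simp
  | succ k ih =>
    intro lo acc hlo hn
    have hlt : lo < PySem.List.len row - m + 1 := by omega
    rw [PySem.List.pyRange_one_cons hlt]
    simp only [List.foldl_cons, List.map_cons]
    by_cases hlast : lo = PySem.List.len row - m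
    · -- last iteration: the remaining range is empty, the stale s is dropped
      have : PySem.List.pyRange (lo + 1) (PySem.List.len row - m + 1) 1 = [] :=
        PySem.List.pyRange_one_eq_nil (by omega)
      rw [this]
      simp [hlast]
    · have hstep : lo + m < PySem.List.len row := by omega
      have hnext : (PySem.List.slice row (some lo) (some (lo + m))).sum
          + PySem.List.pyGetD row (lo + m) 0 - PySem.List.pyGetD row lo 0
          = (PySem.List.slice row (some (lo + 1)) (some (lo + 1 + m))).sum :=
        (window_succ row m lo hm hlo hstep).symm
      simp only [hlast, ne_eq, not_false_iff, if_pos]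
      rw [hnext, ih (lo + 1) (acc ++ [(PySem.List.slice row (some lo) (some (lo + m))).sum]) (by omega) (by omega)]
      simp

theorem inner_eq (row : List Int) (m : Int) (hm : 0 ≤ m) :
    line_sums_inner row m
      = (PySem.List.pyRange 0 (PySem.List.len row - m + 1) 1).map
          (fun j => (PySem.List.slice row (some j) (some (j + m))).sum) := by
  unfold line_sums_inner
  have h0 : (PySem.List.slice row none (some m)).sum
      = (PySem.List.slice row (some (0 : Int)) (some ((0 : Int) + m))).sum := by
    rw [PySem.List.slice_zero_start]
    norm_num
  rw [h0]
  exact loop_aux row m hm ((PySem.List.len row - m + 1 - 0).toNat) 0 [] le_rfl rfl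

-- ===== VERDICT (by name: the statement is the Claim_ definition above) =====
theorem line_sums_spec : Claim_equal_line_sums := by
  intro a m _ hpre
  unfold Spec_line_sums line_sums line_sums_alt
  rcases hpre with hm | rfl
  · rw [PySem.List.foldl_pyRange_zero_pyGetD a []
          (fun lines row => lines ++ [line_sums_inner row m]) [],
        PySem.List.foldl_append_singleton_eq_map]
    exact List.map_congr_left (fun row _ => inner_eq row m hm)
  · rw [PySem.List.len_eq]
    simp [PySem.List.pyRange_one_eq_nil]
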